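-- pv_equiv track=rewrite | github.com/LeanneNortje/DAVEnet_VPKL | test_vpkl.py | get_localisation_metric_count
-- ===== SOURCE A (Python) =====
-- def get_localisation_metric_count(hyp_loc, gt_loc):
--     # Get the number of true positive (n_tp), true positive + false positive (n_tp_fp) and true positive + false negative (n_tp_fn) for a one sample on the localisation task
--     n_tp = 0
--     n_fp = 0
--     n_fn = 0
--
--     for hyp_frame, hyp_token in hyp_loc:
--         if hyp_token not in [gt_token for _, gt_token in gt_loc]:
--             n_fp += 1
--
--     for gt_start_end_frame, gt_token in gt_loc:
--         if gt_token not in [hyp_token for _, hyp_token in hyp_loc]: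
--             n_fn += 1
--             continue
--         for hyp_frame, hyp_token in hyp_loc:
--             if hyp_token == gt_token and (gt_start_end_frame[0] <= hyp_frame < gt_start_end_frame[1] or gt_start_end_frame[0] < hyp_frame <= gt_start_end_frame[1]):
--                 n_tp += 1
--             elif hyp_token == gt_token and (hyp_frame < gt_start_end_frame[0] or gt_start_end_frame[1] < hyp_frame):
--                 n_fp += 1
--
--
--     return n_tp, n_fp, n_fn
-- ===== SOURCE B (Python) =====
-- def get_localisation_metric_count(hyp_loc, gt_loc):
--     # Build a token -> hyp-frames index once, materialise the matched
--     # (span, frame) pairs, and obtain all three counters as counts/sums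
--     # instead of nested rescans with a running state.
--     gt_tokens = {t for _, t in gt_loc}
--     frames_by_token = {}
--     for f, t in hyp_loc:
--         if t in gt_tokens:
--             frames_by_token.setdefault(t, []).append(f)
--     spans = [(g, f) for g, t in gt_loc for f in frames_by_token.get(t, ())]
--     n_tp = sum(1 for (s, e), f in spans if s <= f < e or s < f <= e)
--     n_fp = sum(1 for _, t in hyp_loc if t not in gt_tokens) \
--          + sum(1 for (s, e), f in spans if f < s or e < f)
--     n_fn = sum(1 for _, t in gt_loc if t not in frames_by_token)
--     return n_tp, n_fp, n_fn
-- ===== Notes on version B (the rewrite author's own statement) =====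
-- stated objective: faster
-- what changed: B replaces A's nested rescans and running triple state by a token->frames index built once, a materialised list of matched (span, frame) pairs, and three independent counts over that list.
import Mathlib
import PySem

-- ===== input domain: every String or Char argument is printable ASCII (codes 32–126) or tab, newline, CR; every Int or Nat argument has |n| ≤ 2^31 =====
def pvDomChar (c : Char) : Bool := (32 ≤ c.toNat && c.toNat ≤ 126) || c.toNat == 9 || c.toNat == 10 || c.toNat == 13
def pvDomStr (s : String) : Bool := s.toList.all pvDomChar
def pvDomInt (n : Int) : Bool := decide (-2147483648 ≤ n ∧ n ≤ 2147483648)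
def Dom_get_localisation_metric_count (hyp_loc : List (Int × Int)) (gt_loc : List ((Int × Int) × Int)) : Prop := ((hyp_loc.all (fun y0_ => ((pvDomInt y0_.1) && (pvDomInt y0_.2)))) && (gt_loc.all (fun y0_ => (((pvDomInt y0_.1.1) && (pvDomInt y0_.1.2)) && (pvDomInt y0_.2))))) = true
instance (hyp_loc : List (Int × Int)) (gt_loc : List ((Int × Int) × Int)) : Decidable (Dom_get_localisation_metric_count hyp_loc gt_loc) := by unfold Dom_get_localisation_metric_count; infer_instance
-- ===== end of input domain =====

-- B builds a gt-token set and a token -> hyp-frames index, materialises the matched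
-- (span, frame) pairs once, and computes all three counters as list counts instead of
-- A's nested rescans with a running triple state (asymptotically fewer pair visits).


-- ===== PORT A =====
-- first loop: n_fp += 1 when hyp_token not in [gt_token for _, gt_token in gt_loc]
def pvStepA1 (gtTok : List Int) (nfp : Int) (h : Int × Int) : Int :=
  if h.2 ∈ gtTok then nfp else nfp + 1

-- inner loop body over hyp_loc for one gt entry g (state = (n_tp, n_fp, n_fn))
def pvInnerA (g : (Int × Int) × Int) (st : Int × Int × Int) (h : Int × Int) : Int × Int × Int :=
  if h.2 = g.2 ∧ ((g.1.1 ≤ h.1 ∧ h.1 < g.1.2) ∨ (g.1.1 < h.1 ∧ h.1 ≤ g.1.2)) then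
    (st.1 + 1, st.2.1, st.2.2)
  else if h.2 = g.2 ∧ (h.1 < g.1.1 ∨ g.1.2 < h.1) then
    (st.1, st.2.1 + 1, st.2.2)
  else st

-- second loop body: 'if gt_token not in hyp tokens: n_fn += 1; continue' then the inner loop
def pvOuterA (hyp_loc : List (Int × Int)) (st : Int × Int × Int) (g : (Int × Int) × Int) : Int × Int × Int :=
  if g.2 ∉ hyp_loc.map Prod.snd then (st.1, st.2.1, st.2.2 + 1)
  else hyp_loc.foldl (pvInnerA g) st

def get_localisation_metric_count (hyp_loc : List (Int × Int)) (gt_loc : List ((Int × Int) × Int)) : Int × Int × Int :=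
  let n_fp : Int := hyp_loc.foldl (pvStepA1 (gt_loc.map Prod.snd)) 0
  gt_loc.foldl (pvOuterA hyp_loc) (0, n_fp, 0)

-- ===== PORT B =====
-- s <= f < e or s < f <= e, on a (span, frame) pair
def pvInsideB (p : (Int × Int) × Int) : Bool :=
  (decide (p.1.1 ≤ p.2) && decide (p.2 < p.1.2)) || (decide (p.1.1 < p.2) && decide (p.2 ≤ p.1.2))

-- f < s or e < f, on a (span, frame) pair
def pvOutsideB (p : (Int × Int) × Int) : Bool := decide (p.2 < p.1.1) || decide (p.1.2 < p.2)

-- frames_by_token.setdefault(t, []).append(f) when t in gt_tokens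
def pvIndexB (gts : PySem.Set Int) (d : PySem.Dict Int (List Int)) (h : Int × Int) : PySem.Dict Int (List Int) :=
  if PySem.Set.contains gts h.2 then d.modify h.2 [] (· ++ [h.1]) else d

def get_localisation_metric_count_alt (hyp_loc : List (Int × Int)) (gt_loc : List ((Int × Int) × Int)) : Int × Int × Int :=
  let gts : PySem.Set Int := PySem.Set.ofList (gt_loc.map Prod.snd)
  let d := hyp_loc.foldl (pvIndexB gts) PySem.Dict.empty
  let spans : List ((Int × Int) × Int) :=
    gt_loc.flatMap (fun g => (d.getD g.2 []).map (fun f => (g.1, f)))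
  let n_tp : Int := (spans.countP pvInsideB : Nat)
  let n_fp : Int :=
    ((hyp_loc.countP (fun h => !PySem.Set.contains gts h.2) : Nat) : Int)
      + ((spans.countP pvOutsideB : Nat) : Int)
  let n_fn : Int := (gt_loc.countP (fun g => (d.get? g.2).isNone) : Nat)
  (n_tp, n_fp, n_fn)

-- ===== PRECONDITION & SPEC =====
def Spec_get_localisation_metric_count (hyp_loc : List (Int × Int)) (gt_loc : List ((Int × Int) × Int)) (out : Int × Int × Int) : Prop := out = get_localisation_metric_count_alt hyp_loc gt_loc
instance (hyp_loc : List (Int × Int)) (gt_loc : List ((Int × Int) × Int)) (out : Int × Int × Int) : Decidable (Spec_get_localisation_metric_count hyp_loc gt_loc out) := by unfold Spec_get_localisation_metric_count; infer_instance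

-- ===== CLAIM (what is proved, stated in full; the proofs are below) =====
def Claim_equal_get_localisation_metric_count : Prop := ∀ (hyp_loc : List (Int × Int)) (gt_loc : List ((Int × Int) × Int)), Dom_get_localisation_metric_count hyp_loc gt_loc → Spec_get_localisation_metric_count hyp_loc gt_loc (get_localisation_metric_count hyp_loc gt_loc)

-- ===== LEMMAS AND PROOFS =====

-- hyp predicate counted as TP / as FP for one gt entry g
def pvTpP (g : (Int × Int) × Int) (h : Int × Int) : Bool := h.2 == g.2 && pvInsideB (g.1, h.1)
def pvFpP (g : (Int × Int) × Int) (h : Int × Int) : Bool := h.2 == g.2 && pvOutsideB (g.1, h.1)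

-- per-gt-entry count, summed over a list of gt entries (0 for tokens absent from hyp)
def pvSum (hyp_loc : List (Int × Int)) (q : ((Int × Int) × Int) → (Int × Int) → Bool) :
    List ((Int × Int) × Int) → Nat
  | [] => 0
  | g :: r => (if g.2 ∈ hyp_loc.map Prod.snd then hyp_loc.countP (q g) else 0) + pvSum hyp_loc q r

-- frames of hyps carrying token t, in hyp order
def pvFramesOf (t : Int) (l : List (Int × Int)) : List Int :=
  (l.filter (fun h => h.2 == t)).map Prod.fst

lemma pvFramesOf_cons (t : Int) (h : Int × Int) (rest : List (Int × Int)) :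
    pvFramesOf t (h :: rest) =
      if h.2 = t then h.1 :: pvFramesOf t rest else pvFramesOf t rest := by
  by_cases ht : h.2 = t <;> simp [pvFramesOf, ht]

lemma pvFramesOf_eq_nil (t : Int) (l : List (Int × Int)) (h : t ∉ l.map Prod.snd) :
    pvFramesOf t l = [] := by
  induction l with
  | nil => rfl
  | cons x rest ih =>
    simp only [List.map_cons, List.mem_cons, not_or] at h
    rw [pvFramesOf_cons, if_neg (fun he => h.1 he.symm), ih h.2]

-- A's first loop is a count of unknown-token hyps
lemma pv_fold1_eq (gt_loc : List ((Int × Int) × Int)) (l : List (Int × Int)) :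
    ∀ n : Int, l.foldl (pvStepA1 (gt_loc.map Prod.snd)) n =
      n + ((l.countP (fun h => !PySem.Set.contains (PySem.Set.ofList (gt_loc.map Prod.snd)) h.2) : Nat) : Int) := by
  induction l with
  | nil => intro n; simp [List.countP]
  | cons h rest ih =>
    intro n
    simp only [List.foldl_cons, pvStepA1, List.countP_cons]
    by_cases hm : h.2 ∈ gt_loc.map Prod.snd
    · have hc : PySem.Set.contains (PySem.Set.ofList (gt_loc.map Prod.snd)) h.2 = true := by
        rw [PySem.Set.contains_iff, PySem.Set.mem_ofList]; exact hm
      simp [hm, hc, ih]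
    · have hc : PySem.Set.contains (PySem.Set.ofList (gt_loc.map Prod.snd)) h.2 = false := by
        rw [Bool.eq_false_iff]
        intro hcc
        exact hm ((PySem.Set.mem_ofList _ _).mp ((PySem.Set.contains_iff _ _).mp hcc))
      simp only [hm, if_false, ih, hc, Bool.not_false, if_true]
      omega

-- A's inner loop adds the TP / FP counts for g to the state
lemma pv_innerA_eq (g : (Int × Int) × Int) (l : List (Int × Int)) :
    ∀ st : Int × Int × Int,
      l.foldl (pvInnerA g) st =
        (st.1 + ((l.countP (pvTpP g) : Nat) : Int),
         st.2.1 + ((l.countP (pvFpP g) : Nat) : Int), st.2.2) := by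
  induction l with
  | nil => intro st; simp [List.countP]
  | cons h rest ih =>
    intro st
    simp only [List.foldl_cons, List.countP_cons, pvInnerA]
    by_cases ht : h.2 = g.2
    · by_cases hin : (g.1.1 ≤ h.1 ∧ h.1 < g.1.2) ∨ (g.1.1 < h.1 ∧ h.1 ≤ g.1.2)
      · have hout : ¬ (h.1 < g.1.1 ∨ g.1.2 < h.1) := by omega
        rw [if_pos ⟨ht, hin⟩, ih]
        have h1 : pvTpP g h = true := by
          simp [pvTpP, pvInsideB, ht]; omega
        have h2 : pvFpP g h = false := by
          simp only [pvFpP, pvOutsideB]; simp [ht]; omega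
        simp only [h1, h2, if_true, if_false]
        push_cast
        refine Prod.ext ?_ (Prod.ext ?_ rfl) <;> simp <;> ring
      · rw [if_neg (fun hc => hin hc.2)]
        by_cases hout : h.1 < g.1.1 ∨ g.1.2 < h.1
        · rw [if_pos ⟨ht, hout⟩, ih]
          have h1 : pvTpP g h = false := by
            simp only [pvTpP, pvInsideB]; simp [ht]; omega
          have h2 : pvFpP g h = true := by
            simp [pvFpP, pvOutsideB, ht]; omega
          simp only [h1, h2, if_true, if_false]
          push_cast
          refine Prod.ext ?_ (Prod.ext ?_ rfl) <;> simp <;> ring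
        · rw [if_neg (fun hc => hout hc.2), ih]
          have h1 : pvTpP g h = false := by
            simp only [pvTpP, pvInsideB]; simp [ht]; omega
          have h2 : pvFpP g h = false := by
            simp only [pvFpP, pvOutsideB]; simp [ht]; omega
          simp [h1, h2]
    · rw [if_neg (fun hc => ht hc.1), if_neg (fun hc => ht hc.1), ih]
      have h1 : pvTpP g h = false := by simp [pvTpP, ht]
      have h2 : pvFpP g h = false := by simp [pvFpP, ht]
      simp [h1, h2]

-- A's second loop adds the three sums to the state
lemma pv_outerA_eq (hyp_loc : List (Int × Int)) (gt : List ((Int × Int) × Int)) :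
    ∀ st : Int × Int × Int,
      gt.foldl (pvOuterA hyp_loc) st =
        (st.1 + ((pvSum hyp_loc pvTpP gt : Nat) : Int),
         st.2.1 + ((pvSum hyp_loc pvFpP gt : Nat) : Int),
         st.2.2 + ((gt.countP (fun g => !decide (g.2 ∈ hyp_loc.map Prod.snd)) : Nat) : Int)) := by
  induction gt with
  | nil => intro st; simp [pvSum, List.countP]
  | cons g rest ih =>
    intro st
    simp only [List.foldl_cons, pvOuterA, pvSum, List.countP_cons]
    by_cases hm : g.2 ∈ hyp_loc.map Prod.snd
    · rw [if_neg (fun hc => hc hm), pv_innerA_eq, ih]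
      simp only [hm, if_pos, decide_true, Bool.not_true, if_false]
      push_cast
      refine Prod.ext ?_ (Prod.ext ?_ ?_) <;> simp <;> ring
    · rw [if_pos hm, ih]
      simp only [hm, if_neg, decide_false, Bool.not_false, if_true, if_false]
      push_cast
      refine Prod.ext ?_ (Prod.ext ?_ ?_) <;> simp <;> ring

lemma pv_get?_modify (d : PySem.Dict Int (List Int)) (k : Int) (f : List Int → List Int)
    (t : Int) :
    (d.modify k [] f).get? t = if t = k then some (f (d.getD k [])) else d.get? t := by
  simp only [PySem.Dict.modify]
  exact PySem.Dict.get?_insert d k t (f (d.getD k []))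

lemma pv_getD_modify (d : PySem.Dict Int (List Int)) (k : Int) (f : List Int → List Int)
    (t : Int) :
    (d.modify k [] f).getD t [] = if t = k then f (d.getD k []) else d.getD t [] :=
  PySem.Dict.getD_modify d k t [] f

-- lookup in B's index: present iff the token is a gt token occurring in hyp_loc,
-- and then it holds exactly that token's frames in hyp order
lemma pv_index_get? (gts : PySem.Set Int) (l : List (Int × Int)) :
    ∀ (d : PySem.Dict Int (List Int)) (t : Int),
      (l.foldl (pvIndexB gts) d).get? t =
        if PySem.Set.contains gts t = true ∧ t ∈ l.map Prod.snd then
          some (d.getD t [] ++ pvFramesOf t l)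
        else d.get? t := by
  induction l with
  | nil => intro d t; simp
  | cons h rest ih =>
    intro d t
    simp only [List.foldl_cons, pvIndexB]
    by_cases hc : PySem.Set.contains gts h.2 = true
    · simp only [hc, if_true]
      rw [ih, pv_get?_modify, pv_getD_modify, pvFramesOf_cons]
      by_cases ht : t = h.2
      · simp only [ht, if_true]
        have hcons : h.2 ∈ (h :: rest).map Prod.snd := by simp [List.map_cons]
        rw [if_pos (And.intro hc hcons)]
        by_cases hr : h.2 ∈ rest.map Prod.snd
        · rw [if_pos (And.intro hc hr)]
          simp [List.append_assoc]
        · rw [if_neg (fun hand => hr hand.2), pvFramesOf_eq_nil h.2 rest hr]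
      · have hmem : (t ∈ (h :: rest).map Prod.snd) ↔ t ∈ rest.map Prod.snd := by
          simp only [List.map_cons, List.mem_cons]
          exact ⟨fun hor => hor.resolve_left ht, Or.inr⟩
        rw [if_neg ht, if_neg ht, if_neg (show ¬ h.2 = t from fun he => ht he.symm)]
        simp only [hmem]
    · have hb : PySem.Set.contains gts h.2 = false := Bool.eq_false_iff.mpr (fun hx => hc hx)
      rw [hb]
      simp only [Bool.false_eq_true, if_false]
      rw [ih, pvFramesOf_cons]
      by_cases ht : t = h.2
      · have hct : ¬ PySem.Set.contains gts t = true := fun hcc => hc (ht ▸ hcc)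
        rw [if_neg (fun hand => hct hand.1), if_neg (fun hand => hct hand.1)]
      · have hmem : (t ∈ (h :: rest).map Prod.snd) ↔ t ∈ rest.map Prod.snd := by
          simp only [List.map_cons, List.mem_cons]
          exact ⟨fun hor => hor.resolve_left ht, Or.inr⟩
        rw [if_neg (show ¬ h.2 = t from fun he => ht he.symm)]
        simp only [hmem]

-- specialisation to B's actual index (built from empty, gt tokens only)
lemma pv_d_get? (hyp_loc : List (Int × Int)) (gt_loc : List ((Int × Int) × Int))
    (t : Int) (ht : t ∈ gt_loc.map Prod.snd) :
    (hyp_loc.foldl (pvIndexB (PySem.Set.ofList (gt_loc.map Prod.snd))) PySem.Dict.empty).get? t =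
      if t ∈ hyp_loc.map Prod.snd then some (pvFramesOf t hyp_loc) else none := by
  rw [pv_index_get?]
  have hc : PySem.Set.contains (PySem.Set.ofList (gt_loc.map Prod.snd)) t = true := by
    rw [PySem.Set.contains_iff, PySem.Set.mem_ofList]; exact ht
  by_cases hm : t ∈ hyp_loc.map Prod.snd
  · rw [if_pos ⟨hc, hm⟩, if_pos hm, PySem.Dict.getD_empty]
    simp
  · rw [if_neg (fun hand => hm hand.2), if_neg hm, PySem.Dict.get?_empty]

-- counting a pair predicate over one token's indexed frames = counting matching hyps
lemma pv_frames_countP (g : (Int × Int) × Int) (hyp_loc : List (Int × Int))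
    (p : ((Int × Int) × Int) → Bool) :
    ((pvFramesOf g.2 hyp_loc).map (fun f => (g.1, f))).countP p =
      hyp_loc.countP (fun h => h.2 == g.2 && p (g.1, h.1)) := by
  rw [pvFramesOf, List.map_map, List.countP_map, List.countP_filter]
  apply List.countP_congr
  intro h _
  simp [Function.comp, Bool.and_comm]

-- counting a pair predicate over the materialised spans = pvSum
lemma pv_spans_countP (hyp_loc : List (Int × Int)) (gt_loc : List ((Int × Int) × Int))
    (p : ((Int × Int) × Int) → Bool)
    (q : ((Int × Int) × Int) → (Int × Int) → Bool)
    (hq : ∀ g h, q g h = (h.2 == g.2 && p (g.1, h.1))) :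
    ∀ l : List ((Int × Int) × Int), (∀ g ∈ l, g.2 ∈ gt_loc.map Prod.snd) →
      (l.flatMap (fun g =>
        ((hyp_loc.foldl (pvIndexB (PySem.Set.ofList (gt_loc.map Prod.snd))) PySem.Dict.empty).getD g.2 []).map
          (fun f => (g.1, f)))).countP p = pvSum hyp_loc q l := by
  intro l
  induction l with
  | nil => intro _; rfl
  | cons g rest ih =>
    intro hsub
    simp only [List.flatMap_cons, List.countP_append, pvSum]
    rw [ih (fun x hx => hsub x (List.mem_cons_of_mem g hx))]
    congr 1
    rw [PySem.Dict.getD_eq_get?_getD, pv_d_get? hyp_loc gt_loc g.2 (hsub g (List.mem_cons_self))]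
    by_cases hm : g.2 ∈ hyp_loc.map Prod.snd
    · rw [if_pos hm, if_pos hm, Option.getD_some, pv_frames_countP]
      apply List.countP_congr
      intro h _
      rw [hq]
    · rw [if_neg hm, if_neg hm, Option.getD_none]
      rfl

-- the n_fn count in B agrees with the membership count
lemma pv_fn_count (hyp_loc : List (Int × Int)) (gt_loc : List ((Int × Int) × Int)) :
    gt_loc.countP (fun g =>
        ((hyp_loc.foldl (pvIndexB (PySem.Set.ofList (gt_loc.map Prod.snd))) PySem.Dict.empty).get? g.2).isNone) =
      gt_loc.countP (fun g => !decide (g.2 ∈ hyp_loc.map Prod.snd)) := by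
  apply List.countP_congr
  intro g hg
  rw [pv_d_get? hyp_loc gt_loc g.2 (List.mem_map_of_mem hg)]
  by_cases hm : g.2 ∈ hyp_loc.map Prod.snd <;> simp [hm]

-- ===== VERDICT (by name: the statement is the Claim_ definition above) =====
theorem get_localisation_metric_count_spec : Claim_equal_get_localisation_metric_count := by
  intro hyp_loc gt_loc _
  unfold Spec_get_localisation_metric_count
  simp only [get_localisation_metric_count, get_localisation_metric_count_alt]
  rw [pv_fold1_eq, pv_outerA_eq, pv_fn_count,
      pv_spans_countP hyp_loc gt_loc pvInsideB pvTpP (fun g h => rfl) gt_loc (fun g hg => List.mem_map_of_mem hg),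
      pv_spans_countP hyp_loc gt_loc pvOutsideB pvFpP (fun g h => rfl) gt_loc (fun g hg => List.mem_map_of_mem hg)]
  refine Prod.ext ?_ (Prod.ext ?_ ?_) <;> simp
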